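-- pv_equiv track=rewrite | github.com/AhmedHossamElsayed/ENG_Dina_Task | task1_dfa_divisible_by_3.py | dfa_divisible_by_3
-- ===== SOURCE A (Python) =====
-- def dfa_divisible_by_3(binary_string):
--     state = 0
--
--     for bit in binary_string:
--         if bit not in {'0', '1'}:
--             return False
--         if state == 0:
--             state = 0 if bit == '0' else 1
--         elif state == 1:
--             state = 2 if bit == '1' else 1
--         elif state == 2:
--             state = 0 if bit == '1' else 2
--
--     # Accept if the final state is 0
--     return state == 0
-- ===== SOURCE B (Python) =====
-- def dfa_divisible_by_3(binary_string):
--     ones = 0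
--     for bit in binary_string:
--         if bit == '1':
--             ones += 1
--         elif bit != '0':
--             return False
--     return ones % 3 == 0
-- ===== Notes on version B (the rewrite author's own statement) =====
-- stated objective: simpler
-- what changed: Replaces the explicit 3-state transition table with a single counter of one-bits, returning whether the count is divisible by 3 (A's DFA keeps its state on a zero bit and increments mod 3 on a one bit), still rejecting at the first invalid character.
import Mathlib
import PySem

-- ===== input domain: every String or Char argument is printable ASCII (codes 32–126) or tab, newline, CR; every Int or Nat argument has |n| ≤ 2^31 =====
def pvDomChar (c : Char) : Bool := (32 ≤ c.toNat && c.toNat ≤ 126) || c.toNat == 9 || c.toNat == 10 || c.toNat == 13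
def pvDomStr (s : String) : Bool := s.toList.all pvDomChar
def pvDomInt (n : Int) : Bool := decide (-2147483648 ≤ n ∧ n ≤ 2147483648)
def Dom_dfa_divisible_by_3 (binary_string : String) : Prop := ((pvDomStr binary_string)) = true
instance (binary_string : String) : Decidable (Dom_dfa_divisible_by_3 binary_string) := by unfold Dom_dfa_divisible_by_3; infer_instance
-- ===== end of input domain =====

-- B replaces A's explicit 3-state transition table by a single counter of '1' chars (objective: simpler).

-- ===== PORT A =====
-- loop with early return False on an invalid char; state updated by the transition table
def pvLoopA : List Char → Int → Bool
  | [], state => state == 0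
  | bit :: rest, state =>
    if ¬ (bit = '0' ∨ bit = '1') then false
    else if state == 0 then pvLoopA rest (if bit = '0' then 0 else 1)
    else if state == 1 then pvLoopA rest (if bit = '1' then 2 else 1)
    else if state == 2 then pvLoopA rest (if bit = '1' then 0 else 2)
    else pvLoopA rest state  -- unreachable: state stays in {0,1,2}; falls through like Python's elif chain

def dfa_divisible_by_3 (binary_string : String) : Bool :=
  pvLoopA binary_string.toList 0

-- ===== PORT B =====
def pvLoopB : List Char → Int → Bool
  | [], ones => PySem.Int.mod ones 3 == 0
  | bit :: rest, ones =>
    if bit = '1' then pvLoopB rest (ones + 1)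
    else if bit ≠ '0' then false
    else pvLoopB rest ones

def dfa_divisible_by_3_alt (binary_string : String) : Bool :=
  pvLoopB binary_string.toList 0

-- ===== PRECONDITION & SPEC =====
def Spec_dfa_divisible_by_3 (binary_string : String) (out : Bool) : Prop := out = dfa_divisible_by_3_alt binary_string
instance (binary_string : String) (out : Bool) : Decidable (Spec_dfa_divisible_by_3 binary_string out) := by unfold Spec_dfa_divisible_by_3; infer_instance

-- ===== CLAIM (what is proved, stated in full; the proofs are below) =====
def Claim_equal_dfa_divisible_by_3 : Prop := ∀ (binary_string : String), Dom_dfa_divisible_by_3 binary_string → Spec_dfa_divisible_by_3 binary_string (dfa_divisible_by_3 binary_string)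

-- ===== LEMMAS AND PROOFS =====
lemma pvLoop_agree (l : List Char) (c : Int) (hc : 0 ≤ c) :
    pvLoopA l (c % 3) = pvLoopB l c := by
  induction l generalizing c with
  | nil =>
    simp only [pvLoopA, pvLoopB, PySem.Int.mod]
    rw [Int.fmod_eq_emod]
    simp
  | cons bit rest ih =>
    have hr0 : 0 ≤ c % 3 := Int.emod_nonneg c (by norm_num)
    have hr3 : c % 3 < 3 := Int.emod_lt_of_pos c (by norm_num)
    simp only [pvLoopA, pvLoopB]
    by_cases h1 : bit = '1'
    · subst h1
      rw [if_neg (by simp), if_pos rfl]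
      rw [← ih (c + 1) (by omega)]
      have hcase : c % 3 = 0 ∨ c % 3 = 1 ∨ c % 3 = 2 := by omega
      rcases hcase with h | h | h <;>
        simp [h, show (c + 1) % 3 = (c % 3 + 1) % 3 from by omega]
    · by_cases h0 : bit = '0'
      · subst h0
        rw [if_neg (show ¬¬(('0':Char) = '0' ∨ ('0':Char) = '1') from by simp),
            if_neg h1, if_neg (show ¬(('0':Char) ≠ '0') from by simp)]
        rw [← ih c hc]
        have hcase : c % 3 = 0 ∨ c % 3 = 1 ∨ c % 3 = 2 := by omega
        rcases hcase with h | h | h <;> simp [h]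
      · rw [if_pos (by simp [h0, h1]), if_neg h1, if_pos (by simp [h0])]

-- ===== VERDICT (by name: the statement is the Claim_ definition above) =====
theorem dfa_divisible_by_3_spec : Claim_equal_dfa_divisible_by_3 := by
  intro s _
  unfold Spec_dfa_divisible_by_3 dfa_divisible_by_3 dfa_divisible_by_3_alt
  have := pvLoop_agree s.toList 0 (by omega)
  simpa using this
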